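-- pv_equiv track=rewrite | github.com/lystiger/NLPee | nlp_refiner.py | _apply_phrase_rules
-- ===== SOURCE A (Python) =====
-- def _apply_phrase_rules(words):
--     words = words[:]
--
--     if words == ["CAM_DIEC"]:
--         return "Cảm ơn."
--
--     if words == ["KHONG"]:
--         return "Không."
--
--     if words == ["TOI", "THICH", "HOC"]:
--         return "Tôi thích học."
--
--     if words == ["TOI", "KHONG", "THICH", "HOC"]:
--         return "Tôi không thích học."
--
--     if words == ["BAN", "THICH", "GI"]:
--         return "Bạn thích gì?"
--
--     if words == ["TOI", "THICH", "GI"]: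
--         return "Tôi thích gì?"
--
--     if words == ["BAN", "DI", "HOC"]:
--         return "Bạn đi học."
--
--     if words == ["TOI", "DI", "HOC"]:
--         return "Tôi đi học."
--
--     if words == ["HOM_TRUOC", "TOI", "DI", "HOC"]:
--         return "Hôm trước tôi đi học."
--
--     if words == ["HOM_TRUOC", "BAN", "DI", "HOC"]:
--         return "Hôm trước bạn đi học."
--
--     if len(words) >= 2 and words[-1] == "GI":
--         base = [w for w in words[:-1] if w != "GI"]
--         phrase = " ".join(_word_to_text(word) for word in base).strip()
--         if phrase:
--             return f"{phrase} gì?"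
--         return "Gì?"
--
--     return ""
--
-- def _word_to_text(word):
--     mapping = {
--         "BAN": "bạn",
--         "CAM_DIEC": "cảm ơn",
--         "DI": "đi",
--         "GI": "gì",
--         "HOC": "học",
--         "HOM_TRUOC": "hôm trước",
--         "KHONG": "không",
--         "THICH": "thích",
--         "TOI": "tôi",
--     }
--     return mapping.get(word, word.lower())
-- ===== SOURCE B (Python) =====
-- _WORD_MAP = {
--     "BAN": "bạn",
--     "CAM_DIEC": "cảm ơn",
--     "DI": "đi",
--     "GI": "gì",
--     "HOC": "học",
--     "HOM_TRUOC": "hôm trước",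
--     "KHONG": "không",
--     "THICH": "thích",
--     "TOI": "tôi",
-- }
--
--
-- def _word_to_text(word):
--     return _WORD_MAP.get(word, word.lower())
--
--
-- # Only the recognizable patterns are stored; their Vietnamese sentences are
-- # SYNTHESIZED (translate each word, join, capitalize, punctuate) instead of
-- # being stored as ten literal outputs.
-- _KNOWN_PATTERNS = {
--     ("CAM_DIEC",),
--     ("KHONG",),
--     ("TOI", "THICH", "HOC"),
--     ("TOI", "KHONG", "THICH", "HOC"),
--     ("BAN", "THICH", "GI"),
--     ("TOI", "THICH", "GI"),
--     ("BAN", "DI", "HOC"),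
--     ("TOI", "DI", "HOC"),
--     ("HOM_TRUOC", "TOI", "DI", "HOC"),
--     ("HOM_TRUOC", "BAN", "DI", "HOC"),
-- }
--
--
-- def _apply_phrase_rules(words):
--     words = words[:]
--     if tuple(words) in _KNOWN_PATTERNS:
--         text = " ".join(_word_to_text(w) for w in words)
--         mark = "?" if words[-1] == "GI" else "."
--         return text[0].upper() + text[1:] + mark
--     if len(words) >= 2 and words[-1] == "GI":
--         base = [w for w in words[:-1] if w != "GI"]
--         phrase = " ".join(_word_to_text(word) for word in base).strip()
--         if phrase:
--             return f"{phrase} gì?"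
--         return "Gì?"
--     return ""
-- ===== Notes on version B (the rewrite author's own statement) =====
-- stated objective: alternative
-- what changed: A stores ten literal Vietnamese sentences behind ten sequential list-equality branches; B stores only the ten recognizable word patterns and synthesizes the sentence (translate each word with the word map, join with spaces, capitalize the first letter, append '?' for GI-final patterns else '.'), so the outputs are computed, not stored.
import Mathlib
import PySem

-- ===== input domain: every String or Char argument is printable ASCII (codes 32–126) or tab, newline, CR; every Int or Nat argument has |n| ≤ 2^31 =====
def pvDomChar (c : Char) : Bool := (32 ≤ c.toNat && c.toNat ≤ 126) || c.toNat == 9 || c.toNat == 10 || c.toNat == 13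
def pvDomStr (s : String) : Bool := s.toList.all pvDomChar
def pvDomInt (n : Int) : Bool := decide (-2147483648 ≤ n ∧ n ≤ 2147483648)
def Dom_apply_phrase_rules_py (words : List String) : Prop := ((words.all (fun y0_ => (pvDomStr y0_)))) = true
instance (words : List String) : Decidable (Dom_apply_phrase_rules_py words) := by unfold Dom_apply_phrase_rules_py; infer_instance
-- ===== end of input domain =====

-- B stores only the ten recognizable word patterns and synthesizes each sentence
-- (translate, join, capitalize, punctuate) instead of storing ten literal outputs.

-- ===== PORT A =====
-- mapping.get(word, word.lower())
def word_to_text (word : String) : String :=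
  let mapping : PySem.Dict String String := PySem.Dict.ofList
    [("BAN", "bạn"), ("CAM_DIEC", "cảm ơn"), ("DI", "đi"), ("GI", "gì"),
     ("HOC", "học"), ("HOM_TRUOC", "hôm trước"), ("KHONG", "không"),
     ("THICH", "thích"), ("TOI", "tôi")]
  PySem.Dict.getD mapping word (PySem.Str.lower word)

def apply_phrase_rules_py (words : List String) : String :=
  if words = ["CAM_DIEC"] then "Cảm ơn."
  else if words = ["KHONG"] then "Không."
  else if words = ["TOI", "THICH", "HOC"] then "Tôi thích học."
  else if words = ["TOI", "KHONG", "THICH", "HOC"] then "Tôi không thích học."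
  else if words = ["BAN", "THICH", "GI"] then "Bạn thích gì?"
  else if words = ["TOI", "THICH", "GI"] then "Tôi thích gì?"
  else if words = ["BAN", "DI", "HOC"] then "Bạn đi học."
  else if words = ["TOI", "DI", "HOC"] then "Tôi đi học."
  else if words = ["HOM_TRUOC", "TOI", "DI", "HOC"] then "Hôm trước tôi đi học."
  else if words = ["HOM_TRUOC", "BAN", "DI", "HOC"] then "Hôm trước bạn đi học."
  else if 2 ≤ words.length ∧ PySem.List.pyGet? words (-1) = some "GI" then
    let base := (PySem.List.slice words none (some (-1))).filter (fun w => decide (w ≠ "GI"))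
    let phrase := PySem.Str.strip (PySem.Str.join " " (base.map word_to_text))
    if phrase ≠ "" then phrase ++ " gì?" else "Gì?"
  else ""

-- ===== PORT B =====
-- the Python set of ten pattern tuples, as a list of its distinct elements
def known_patterns : List (List String) :=
  [ ["CAM_DIEC"], ["KHONG"],
    ["TOI", "THICH", "HOC"], ["TOI", "KHONG", "THICH", "HOC"],
    ["BAN", "THICH", "GI"], ["TOI", "THICH", "GI"],
    ["BAN", "DI", "HOC"], ["TOI", "DI", "HOC"],
    ["HOM_TRUOC", "TOI", "DI", "HOC"], ["HOM_TRUOC", "BAN", "DI", "HOC"] ]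

def apply_phrase_rules_py_alt (words : List String) : String :=
  if words ∈ known_patterns then
    let text := PySem.Str.join " " (words.map word_to_text)
    let mark := if PySem.List.pyGet? words (-1) = some "GI" then "?" else "."
    -- text[0].upper() + text[1:]: exact here since text is nonempty (pattern matched)
    PySem.Str.upper (PySem.Str.slice text none (some 1)) ++ PySem.Str.slice text (some 1) none ++ mark
  else if 2 ≤ words.length ∧ PySem.List.pyGet? words (-1) = some "GI" then
    let base := (PySem.List.slice words none (some (-1))).filter (fun w => decide (w ≠ "GI"))
    let phrase := PySem.Str.strip (PySem.Str.join " " (base.map word_to_text))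
    if phrase ≠ "" then phrase ++ " gì?" else "Gì?"
  else ""

-- ===== PRECONDITION & SPEC =====
def Spec_apply_phrase_rules_py (words : List String) (out : String) : Prop := out = apply_phrase_rules_py_alt words
instance (words : List String) (out : String) : Decidable (Spec_apply_phrase_rules_py words out) := by unfold Spec_apply_phrase_rules_py; infer_instance

-- ===== CLAIM =====
def Claim_equal_apply_phrase_rules_py : Prop := ∀ (words : List String), Dom_apply_phrase_rules_py words → Spec_apply_phrase_rules_py words (apply_phrase_rules_py words)

-- ===== LEMMAS AND PROOFS =====

-- ===== VERDICT =====
theorem apply_phrase_rules_py_spec : Claim_equal_apply_phrase_rules_py := by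
  intro words _
  show apply_phrase_rules_py words = apply_phrase_rules_py_alt words
  by_cases h1 : words = ["CAM_DIEC"]; · subst h1; rfl
  by_cases h2 : words = ["KHONG"]; · subst h2; rfl
  by_cases h3 : words = ["TOI", "THICH", "HOC"]; · subst h3; rfl
  by_cases h4 : words = ["TOI", "KHONG", "THICH", "HOC"]; · subst h4; rfl
  by_cases h5 : words = ["BAN", "THICH", "GI"]; · subst h5; rfl
  by_cases h6 : words = ["TOI", "THICH", "GI"]; · subst h6; rfl
  by_cases h7 : words = ["BAN", "DI", "HOC"]; · subst h7; rfl
  by_cases h8 : words = ["TOI", "DI", "HOC"]; · subst h8; rfl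
  by_cases h9 : words = ["HOM_TRUOC", "TOI", "DI", "HOC"]; · subst h9; rfl
  by_cases h10 : words = ["HOM_TRUOC", "BAN", "DI", "HOC"]; · subst h10; rfl
  have hmem : words ∉ known_patterns := by
    simp [known_patterns, h1, h2, h3, h4, h5, h6, h7, h8, h9, h10]
  unfold apply_phrase_rules_py apply_phrase_rules_py_alt
  rw [if_neg hmem]
  rw [if_neg h1, if_neg h2, if_neg h3, if_neg h4, if_neg h5,
      if_neg h6, if_neg h7, if_neg h8, if_neg h9, if_neg h10]
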